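-- pv_equiv track=rewrite | github.com/Jaks-Praeger/Megatronics | turnIntoRobotCommands.py | generate_commands
-- ===== SOURCE A (Python) =====
-- def generate_commands(path):
--     if not path or len(path) < 2:
--         return []
--
--     # Initial direction (Assume starting facing North)
--     directions = {(0, 1): "N", (1, 0): "E", (0, -1): "S", (-1, 0): "W"}
--     current_direction = "W"
--
--     # Direction transitions (N->E, E->S, S->W, W->N)
--     turn_right = {"N": "E", "E": "S", "S": "W", "W": "N"}
--     turn_left = {v: k for k, v in turn_right.items()}
--
--     commands = []
--     move_count = 0  # Track consecutive moves
--
--     for i in range(1, len(path)):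
--         x_old, y_old = path[i - 1]
--         x_new, y_new = path[i]
--
--         # Calculate movement direction
--         dx, dy = x_new - x_old, y_new - y_old
--
--         # Determine the new direction
--         new_direction = directions.get((dx, dy))
--         if new_direction is None:
--             continue  # Ignore invalid movements
--
--         # Adjust direction if needed
--         if current_direction != new_direction:
--             # If we were moving forward, append the move count before turning
--             if move_count > 0:
--                 commands.append(f"moveForward({move_count})")
--                 move_count = 0  # Reset move counter
--
--             # Turn until facing the correct direction
--             while current_direction != new_direction:
--                 if turn_right[current_direction] == new_direction:
--                     commands.append("turnRight()")
--                     current_direction = turn_right[current_direction]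
--                 else:
--                     commands.append("turnLeft()")
--                     current_direction = turn_left[current_direction]
--
--         # Count consecutive moves
--         move_count += 1
--
--     # Append any remaining forward moves
--     if move_count > 0:
--         commands.append(f"moveForward({move_count})")
--
--     return commands
-- ===== SOURCE B (Python) =====
-- def generate_commands(path):
--     # Two-phase decomposition: map consecutive pairs to direction indices
--     # (N=0,E=1,S=2,W=3), then emit commands per maximal run of equal
--     # directions, with turns computed from (new - cur) % 4.
--     dirs = {(0, 1): 0, (1, 0): 1, (0, -1): 2, (-1, 0): 3}
--     steps = [dirs[(b[0] - a[0], b[1] - a[1])]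
--              for a, b in zip(path, path[1:])
--              if (b[0] - a[0], b[1] - a[1]) in dirs]
--     commands = []
--     cur = 3  # start facing West
--     i = 0
--     n = len(steps)
--     while i < n:
--         j = i
--         while j < n and steps[j] == steps[i]:
--             j += 1
--         d = (steps[i] - cur) % 4
--         if d == 1:
--             commands.append("turnRight()")
--         elif d == 3:
--             commands.append("turnLeft()")
--         elif d == 2:
--             commands.append("turnLeft()")
--             commands.append("turnLeft()")
--         commands.append(f"moveForward({j - i})")
--         cur = steps[i]
--         i = j
--     return commands
-- ===== Notes on version B (the rewrite author's own statement) =====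
-- stated objective: alternative
-- what changed: B splits the work into two phases: it first extracts the list of unit-step direction indices from consecutive path pairs, then emits commands per maximal run of equal directions, computing the turns arithmetically from (new - cur) % 4 instead of A's dict-driven while loop with a running move counter and flush logic.
import Mathlib
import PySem

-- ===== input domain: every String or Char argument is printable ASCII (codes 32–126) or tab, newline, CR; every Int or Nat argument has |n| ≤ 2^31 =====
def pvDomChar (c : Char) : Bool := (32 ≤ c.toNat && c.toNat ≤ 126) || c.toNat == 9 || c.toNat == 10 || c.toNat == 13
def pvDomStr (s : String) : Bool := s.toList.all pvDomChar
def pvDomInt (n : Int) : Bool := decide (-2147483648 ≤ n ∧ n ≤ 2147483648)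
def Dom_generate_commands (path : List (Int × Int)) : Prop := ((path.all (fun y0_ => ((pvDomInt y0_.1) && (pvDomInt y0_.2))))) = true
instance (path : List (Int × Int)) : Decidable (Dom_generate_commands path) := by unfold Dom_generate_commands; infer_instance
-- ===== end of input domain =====

-- B re-implements A by a two-phase decomposition (first extract the list of unit-step
-- directions, then emit turn/move commands per maximal run of equal directions, with turns
-- computed from (new - cur) % 4); same return value, objective: alternative decomposition.

-- ===== PORT A =====
-- f"moveForward({n})" (shared formatting helper, used by both Pythons verbatim)
def pvMoveCmd (n : Int) : String := "moveForward(" ++ PySem.Int.toStr n ++ ")"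

-- directions = {(0, 1): "N", (1, 0): "E", (0, -1): "S", (-1, 0): "W"}
def pvDirsA : PySem.Dict (Int × Int) String :=
  PySem.Dict.ofList [((0, 1), "N"), ((1, 0), "E"), ((0, -1), "S"), ((-1, 0), "W")]
-- turn_right = {"N": "E", "E": "S", "S": "W", "W": "N"}
def pvTurnRightA : PySem.Dict String String :=
  PySem.Dict.ofList [("N", "E"), ("E", "S"), ("S", "W"), ("W", "N")]
-- turn_left = {v: k for k, v in turn_right.items()}
def pvTurnLeftA : PySem.Dict String String :=
  PySem.Dict.ofList (pvTurnRightA.items.map (fun p => (p.2, p.1)))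

-- the 'while current_direction != new_direction' loop; fuel only makes it total (on the
-- reachable states — both strings among "N","E","S","W" — fuel 4 is never exhausted);
-- turn_right[cur] / turn_left[cur]: the KeyError default "" is unreachable on those states
def pvTurnWhileA : Nat → String → String → List String → String × List String
  | 0, cur, _, cmds => (cur, cmds)
  | f + 1, cur, nd, cmds =>
    if cur ≠ nd then
      if pvTurnRightA.getD cur "" = nd then
        pvTurnWhileA f (pvTurnRightA.getD cur "") nd (cmds ++ ["turnRight()"])
      else
        pvTurnWhileA f (pvTurnLeftA.getD cur "") nd (cmds ++ ["turnLeft()"])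
    else (cur, cmds)

-- the body of 'for i in ...' applied to (path[i-1], path[i]); state = (current_direction, commands, move_count)
def pvStepA (st : String × List String × Int) (pOld pNew : Int × Int) : String × List String × Int :=
  match pvDirsA.get? (pNew.1 - pOld.1, pNew.2 - pOld.2) with
  | none => st  -- continue
  | some nd =>
    let st2 :=
      if st.1 ≠ nd then
        let flushed : List String × Int :=
          if st.2.2 > 0 then (st.2.1 ++ [pvMoveCmd st.2.2], 0) else (st.2.1, st.2.2)
        let t := pvTurnWhileA 4 st.1 nd flushed.1
        (t.1, t.2, flushed.2)
      else st
    (st2.1, st2.2.1, st2.2.2 + 1)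

def generate_commands (path : List (Int × Int)) : List String :=
  if path = [] ∨ (path.length : Int) < 2 then []
  else
    let fin :=
      (PySem.List.pyRange 1 (path.length : Int)).foldl
        (fun st i =>
          pvStepA st (PySem.List.pyGetD path (i - 1) (0, 0)) (PySem.List.pyGetD path i (0, 0)))
        ("W", ([], (0 : Int)))
    if fin.2.2 > 0 then fin.2.1 ++ [pvMoveCmd fin.2.2] else fin.2.1

-- ===== PORT B =====
-- dirs = {(0, 1): 0, (1, 0): 1, (0, -1): 2, (-1, 0): 3}
def pvDirsB : PySem.Dict (Int × Int) Int :=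
  PySem.Dict.ofList [((0, 1), 0), ((1, 0), 1), ((0, -1), 2), ((-1, 0), 3)]

-- the steps comprehension: '(dx,dy) in dirs' guard + 'dirs[(dx,dy)]' lookup = filterMap get?
def pvStepsB (path : List (Int × Int)) : List Int :=
  (path.zip (path.drop 1)).filterMap
    (fun ab => pvDirsB.get? (ab.2.1 - ab.1.1, ab.2.2 - ab.1.2))

-- the d = (steps[i] - cur) % 4 dispatch
def pvTurnCmdsB (cur s : Int) : List String :=
  let d := PySem.Int.mod (s - cur) 4
  if d = 1 then ["turnRight()"]
  else if d = 3 then ["turnLeft()"]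
  else if d = 2 then ["turnLeft()", "turnLeft()"]
  else []

-- the outer while over runs; the inner index scan j is the takeWhile/dropWhile split of the rest
def pvRunsB : Int → List Int → List String
  | _, [] => []
  | cur, s :: rest =>
    pvTurnCmdsB cur s
      ++ [pvMoveCmd (1 + ((rest.takeWhile (· == s)).length : Int))]
      ++ pvRunsB s (rest.dropWhile (· == s))
termination_by _ l => l.length
decreasing_by
  simp only [List.length_cons]
  exact Nat.lt_succ_of_le (List.length_dropWhile_le _ _)

def generate_commands_alt (path : List (Int × Int)) : List String :=
  pvRunsB 3 (pvStepsB path)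

-- ===== PRECONDITION & SPEC =====
def Spec_generate_commands (path : List (Int × Int)) (out : List String) : Prop := out = generate_commands_alt path
instance (path : List (Int × Int)) (out : List String) : Decidable (Spec_generate_commands path out) := by unfold Spec_generate_commands; infer_instance

-- ===== CLAIM (what is proved, stated in full; the proofs are below) =====
def Claim_equal_generate_commands : Prop := ∀ (path : List (Int × Int)), Dom_generate_commands path → Spec_generate_commands path (generate_commands path)

-- ===== LEMMAS AND PROOFS =====

-- direction index ↦ A's direction letter
def pvNumToDir (n : Int) : String :=
  if n = 0 then "N" else if n = 1 then "E" else if n = 2 then "S" else "W"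

-- A's loop state machine, abstracted over the extracted direction list (cur as an index)
def pvLoopAN : Int → List String → Int → List Int → List String
  | _, cmds, mc, [] => if mc > 0 then cmds ++ [pvMoveCmd mc] else cmds
  | cur, cmds, mc, s :: rest =>
    if cur = s then pvLoopAN cur cmds (mc + 1) rest
    else pvLoopAN s ((if mc > 0 then cmds ++ [pvMoveCmd mc] else cmds) ++ pvTurnCmdsB cur s) 1 rest

-- A's indexed fold over range(1, len(path)) as a structural fold over consecutive pairs
def pvPairFold {S : Type} (f : S → (Int × Int) → (Int × Int) → S) : S → List (Int × Int) → S
  | st, a :: b :: rest => pvPairFold f (f st a b) (b :: rest)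
  | st, _ => st

lemma pvTurnWhileA_append (f : Nat) (cur nd : String) (cmds : List String) :
    pvTurnWhileA f cur nd cmds
      = ((pvTurnWhileA f cur nd []).1, cmds ++ (pvTurnWhileA f cur nd []).2) := by
  induction f generalizing cur cmds with
  | zero => simp [pvTurnWhileA]
  | succ f ih =>
    by_cases h : cur = nd
    · simp [pvTurnWhileA, h]
    · by_cases hr : pvTurnRightA.getD cur "" = nd
      · rw [pvTurnWhileA, pvTurnWhileA, if_pos h, if_pos h, if_pos hr, if_pos hr,
          ih _ (cmds ++ ["turnRight()"]), ih _ ([] ++ ["turnRight()"])]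
        simp
      · rw [pvTurnWhileA, pvTurnWhileA, if_pos h, if_pos h, if_neg hr, if_neg hr,
          ih _ (cmds ++ ["turnLeft()"]), ih _ ([] ++ ["turnLeft()"])]
        simp

lemma pvTurnWhileA_spec (c s : Int) (hc0 : 0 ≤ c) (hc4 : c < 4) (hs0 : 0 ≤ s) (hs4 : s < 4) :
    pvTurnWhileA 4 (pvNumToDir c) (pvNumToDir s) [] = (pvNumToDir s, pvTurnCmdsB c s) := by
  have hc : c = 0 ∨ c = 1 ∨ c = 2 ∨ c = 3 := by omega
  have hs : s = 0 ∨ s = 1 ∨ s = 2 ∨ s = 3 := by omega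
  rcases hc with h | h | h | h <;> rcases hs with h' | h' | h' | h' <;> subst h <;> subst h' <;> decide

lemma pvNumToDir_inj (c s : Int) (hc0 : 0 ≤ c) (hc4 : c < 4) (hs0 : 0 ≤ s) (hs4 : s < 4) :
    pvNumToDir c = pvNumToDir s ↔ c = s := by
  have hc : c = 0 ∨ c = 1 ∨ c = 2 ∨ c = 3 := by omega
  have hs : s = 0 ∨ s = 1 ∨ s = 2 ∨ s = 3 := by omega
  rcases hc with h | h | h | h <;> rcases hs with h' | h' | h' | h' <;> subst h <;> subst h' <;> decide

lemma pvDirsB_range (p : Int × Int) (v : Int) (h : pvDirsB.get? p = some v) :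
    0 ≤ v ∧ v < 4 := by
  have e : pvDirsB = PySem.Dict.mk [((0, 1), 0), ((1, 0), 1), ((0, -1), 2), ((-1, 0), 3)] := rfl
  rw [e] at h
  simp only [PySem.Dict.get?_mk_cons] at h
  split_ifs at h <;> simp_all [PySem.Dict.get?] <;> omega

lemma pvDirs_link (p : Int × Int) :
    pvDirsA.get? p = (pvDirsB.get? p).map pvNumToDir := by
  have eA : pvDirsA = PySem.Dict.mk [((0, 1), "N"), ((1, 0), "E"), ((0, -1), "S"), ((-1, 0), "W")] := rfl
  have eB : pvDirsB = PySem.Dict.mk [((0, 1), 0), ((1, 0), 1), ((0, -1), 2), ((-1, 0), 3)] := rfl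
  rw [eA, eB]
  simp only [PySem.Dict.get?_mk_cons]
  split_ifs <;> simp [pvNumToDir, PySem.Dict.get?]

lemma pvPyRange_shift (a b : Int) :
    PySem.List.pyRange (a + 1) (b + 1) = (PySem.List.pyRange a b).map (· + 1) := by
  rw [PySem.List.pyRange_one, PySem.List.pyRange_one, List.map_map]
  have : b + 1 - (a + 1) = b - a := by ring
  rw [this]
  exact List.map_congr_left (fun k _ => by simp only [Function.comp_apply]; omega)

lemma pvGetD_cons_shift (x : Int × Int) (xs : List (Int × Int)) (i : Int) (d : Int × Int)
    (h1 : 1 ≤ i) (h2 : i ≤ (xs.length : Int)) :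
    PySem.List.pyGetD (x :: xs) i d = PySem.List.pyGetD xs (i - 1) d := by
  rw [PySem.List.pyGetD_eq_getElem (x :: xs) d (by omega) (by simp; omega),
    PySem.List.pyGetD_eq_getElem xs d (by omega) (by omega)]
  have hne : i.toNat ≠ 0 := by omega
  rw [List.getElem_cons, dif_neg hne]
  congr 1
  omega

lemma pvBridgeA {S : Type} (f : S → (Int × Int) → (Int × Int) → S) (d : Int × Int) :
    ∀ (path : List (Int × Int)) (init : S),
      (PySem.List.pyRange 1 (path.length : Int)).foldl
          (fun st i => f st (PySem.List.pyGetD path (i - 1) d) (PySem.List.pyGetD path i d)) init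
        = pvPairFold f init path := by
  intro path
  induction path with
  | nil => intro init; simp [PySem.List.pyRange_one_eq_nil, pvPairFold]
  | cons a tl ih =>
    intro init
    match tl with
    | [] => simp [PySem.List.pyRange_one_eq_nil, pvPairFold]
    | b :: rest =>
      have hlen : ((a :: b :: rest).length : Int) = (((b :: rest).length : Int)) + 1 := by
        simp
      rw [PySem.List.pyRange_one_cons
        (by simp only [List.length_cons]; push_cast; omega), List.foldl_cons]
      have h0 : PySem.List.pyGetD (a :: b :: rest) ((1 : Int) - 1) d = a := by
        norm_num [PySem.List.pyGetD_zero_cons]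
      have h1 : PySem.List.pyGetD (a :: b :: rest) (1 : Int) d = b := by
        rw [PySem.List.pyGetD_eq_getElem _ d (by omega)
          (by simp only [List.length_cons]; push_cast; omega)]; rfl
      rw [h0, h1, hlen, pvPyRange_shift, List.foldl_map]
      rw [PySem.List.foldl_congr_mem _ _
        (fun st i => f st (PySem.List.pyGetD (b :: rest) (i - 1) d)
          (PySem.List.pyGetD (b :: rest) i d)) _ ?_]
      · exact ih (f init a b)
      · intro acc x hx
        rw [PySem.List.mem_pyRange_one] at hx
        obtain ⟨hx1, hx2⟩ := hx
        simp only [List.length_cons] at hx2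
        push_cast at hx2
        have e1 : PySem.List.pyGetD (a :: b :: rest) (x + 1 - 1) d
            = PySem.List.pyGetD (b :: rest) (x - 1) d := by
          have := pvGetD_cons_shift a (b :: rest) x d (by omega)
            (by simp only [List.length_cons]; push_cast; omega)
          simpa using this
        have e2 : PySem.List.pyGetD (a :: b :: rest) (x + 1) d
            = PySem.List.pyGetD (b :: rest) x d := by
          have := pvGetD_cons_shift a (b :: rest) (x + 1) d (by omega)
            (by simp only [List.length_cons]; push_cast; omega)
          simpa using this
        rw [e1, e2]

lemma pvStepBridge :
    ∀ (path : List (Int × Int)) (c : Int) (cmds : List String) (mc : Int),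
      0 ≤ c → c < 4 → 0 ≤ mc →
      (let fin := pvPairFold pvStepA (pvNumToDir c, cmds, mc) path
       if fin.2.2 > 0 then fin.2.1 ++ [pvMoveCmd fin.2.2] else fin.2.1)
        = pvLoopAN c cmds mc (pvStepsB path) := by
  intro path
  induction path with
  | nil => intro c cmds mc _ _ _; rfl
  | cons a tl ih =>
    intro c cmds mc hc0 hc4 hmc0
    match tl with
    | [] => rfl
    | b :: rest =>
      have hsteps : pvStepsB (a :: b :: rest)
          = (pvDirsB.get? (b.1 - a.1, b.2 - a.2)).toList ++ pvStepsB (b :: rest) := by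
        simp [pvStepsB, List.filterMap_cons]
        cases pvDirsB.get? (b.1 - a.1, b.2 - a.2) <;> simp
      show (let fin := pvPairFold pvStepA (pvStepA (pvNumToDir c, cmds, mc) a b) (b :: rest)
            if fin.2.2 > 0 then fin.2.1 ++ [pvMoveCmd fin.2.2] else fin.2.1)
          = pvLoopAN c cmds mc (pvStepsB (a :: b :: rest))
      rw [hsteps]
      cases hdb : pvDirsB.get? (b.1 - a.1, b.2 - a.2) with
      | none =>
        have hA : pvStepA (pvNumToDir c, cmds, mc) a b = (pvNumToDir c, cmds, mc) := by
          unfold pvStepA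
          rw [pvDirs_link, hdb]
          rfl
        rw [hA]
        simpa using ih c cmds mc hc0 hc4 hmc0
      | some s =>
        obtain ⟨hs0, hs4⟩ := pvDirsB_range _ _ hdb
        by_cases hcs : c = s
        · have hA : pvStepA (pvNumToDir c, cmds, mc) a b = (pvNumToDir c, cmds, mc + 1) := by
            unfold pvStepA
            rw [pvDirs_link, hdb]
            simp [hcs]
          rw [hA]
          have h2 := ih c cmds (mc + 1) hc0 hc4 (by omega)
          simp only [Option.toList_some, List.singleton_append]
          rw [pvLoopAN, if_pos hcs]
          simpa using h2
        · have hne : pvNumToDir c ≠ pvNumToDir s := by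
            rw [Ne, pvNumToDir_inj c s hc0 hc4 hs0 hs4]; exact hcs
          have hA : pvStepA (pvNumToDir c, cmds, mc) a b
              = (pvNumToDir s,
                 ((if mc > 0 then cmds ++ [pvMoveCmd mc] else cmds) ++ pvTurnCmdsB c s), 1) := by
            unfold pvStepA
            rw [pvDirs_link, hdb]
            by_cases hmc : mc > 0
            · simp only [Option.map_some, hmc]
              rw [pvTurnWhileA_append, pvTurnWhileA_spec c s hc0 hc4 hs0 hs4]
              simp [hne]
            · have hmz : mc = 0 := by omega
              subst hmz
              simp only [Option.map_some]
              rw [pvTurnWhileA_append, pvTurnWhileA_spec c s hc0 hc4 hs0 hs4]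
              simp [hne]
          rw [hA]
          have h2 := ih s ((if mc > 0 then cmds ++ [pvMoveCmd mc] else cmds) ++ pvTurnCmdsB c s) 1
            hs0 hs4 (by omega)
          simp only [Option.toList_some, List.singleton_append]
          rw [pvLoopAN, if_neg hcs]
          simpa using h2

lemma pvTurnCmdsB_self (c : Int) : pvTurnCmdsB c c = [] := by
  unfold pvTurnCmdsB
  simp

lemma pvLoopAN_runs :
    ∀ (steps : List Int) (c : Int) (cmds : List String) (mc : Int), 0 ≤ mc →
      pvLoopAN c cmds mc steps
        = cmds ++ (if mc = 0 then pvRunsB c steps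
            else pvMoveCmd (mc + ((steps.takeWhile (· == c)).length : Int))
              :: pvRunsB c (steps.dropWhile (· == c))) := by
  intro steps
  induction steps with
  | nil =>
    intro c cmds mc hmc
    by_cases h : mc = 0
    · simp [pvLoopAN, h, pvRunsB]
    · simp [pvLoopAN, pvRunsB, show mc > 0 by omega, h]
  | cons s rest ih =>
    intro c cmds mc hmc
    by_cases hcs : c = s
    · subst hcs
      rw [pvLoopAN, if_pos rfl, ih c cmds (mc + 1) (by omega)]
      by_cases h : mc = 0
      · subst h
        simp only [zero_add]
        rw [pvRunsB, pvTurnCmdsB_self]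
        simp
      · have ht : List.takeWhile (· == c) (c :: rest) = c :: List.takeWhile (· == c) rest := by
          simp
        have hd : List.dropWhile (· == c) (c :: rest) = List.dropWhile (· == c) rest := by
          simp
        rw [ht, hd]
        simp only [if_neg h, if_neg (by omega : ¬ mc + 1 = 0), List.length_cons]
        congr 3
        push_cast
        ring
    · have hbeq : (s == c) = false := by simp [Ne.symm hcs]
      rw [pvLoopAN, if_neg hcs, ih s _ 1 (by omega)]
      have hrun : pvRunsB c (s :: rest)
          = pvTurnCmdsB c s ++ pvMoveCmd (1 + ((rest.takeWhile (· == s)).length : Int))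
              :: pvRunsB s (rest.dropWhile (· == s)) := by
        rw [pvRunsB]; simp
      by_cases h : mc = 0
      · subst h
        simp only [if_neg (by omega : ¬ (1 : Int) = 0), gt_iff_lt, lt_irrefl]
        rw [hrun]
        simp
      · have ht : List.takeWhile (· == c) (s :: rest) = [] := by
          simp [hbeq]
        have hd : List.dropWhile (· == c) (s :: rest) = s :: rest := by
          simp [hbeq]
        rw [ht, hd, hrun]
        simp only [if_neg h, if_neg (by omega : ¬ (1 : Int) = 0), if_pos (by omega : mc > 0)]
        simp

lemma pvStepsB_short (path : List (Int × Int)) (h : (path.length : Int) < 2) :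
    pvStepsB path = [] := by
  match path with
  | [] => rfl
  | [a] => rfl
  | a :: b :: rest => simp at h; omega

-- ===== VERDICT (by name: the statement is the Claim_ definition above) =====
theorem generate_commands_spec : Claim_equal_generate_commands := by
  intro path _
  unfold Spec_generate_commands generate_commands generate_commands_alt
  by_cases h : path = [] ∨ (path.length : Int) < 2
  · rw [if_pos h]
    have hlen : (path.length : Int) < 2 := by
      rcases h with h | h
      · subst h; simp
      · exact h
    rw [pvStepsB_short path hlen, pvRunsB]
  · rw [if_neg h]
    have hW : ("W", ([] : List String), (0 : Int)) = (pvNumToDir 3, ([] : List String), (0 : Int)) := rfl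
    rw [hW, pvBridgeA pvStepA (0, 0) path]
    have := pvStepBridge path 3 [] 0 (by omega) (by omega) (by omega)
    simp only at this
    rw [this, pvLoopAN_runs (pvStepsB path) 3 [] 0 le_rfl]
    simp
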